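-- pv_equiv track=rewrite | github.com/swkim-sm/practice | codingTest/BOJ/gold/greedy/1548_부분삼각수열.py | check_func
-- ===== SOURCE A (Python) =====
-- def check_func(arr, l, r):
--     if r-l < 2 or l == r:
--         return True
--     for x in range(l, r):
--         for y in range(x+1, r):
--             for z in range(y+1, r+1):
--                 if arr[x]+arr[y] <= arr[z] or arr[y]+arr[z] <= arr[x] or arr[z]+arr[x] <= arr[y]:
--                     return False
--     return True
-- ===== SOURCE B (Python) =====
-- def check_func(arr, l, r):
--     # One pass over the window: all triangles are valid iff min1 + min2 > max.
--     if r - l < 2: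
--         return True
--     v0, v1 = arr[l], arr[l + 1]
--     m1, m2 = (v0, v1) if v0 <= v1 else (v1, v0)
--     mx = m2
--     for i in range(l + 2, r + 1):
--         v = arr[i]
--         if v < m1:
--             m1, m2 = v, m1
--         elif v < m2:
--             m2 = v
--         if v > mx:
--             mx = v
--     return m1 + m2 > mx
-- ===== Notes on version B (the rewrite author's own statement) =====
-- stated objective: alternative
-- what changed: Replaces the triple nested loop over all index triples by a single pass that tracks the two smallest values and the maximum of the window and returns min1+min2 > max (A often early-exits, so no speedup was measured).
-- outside the precondition, e.g. on check_func([1, 1, 5], 0, 3): A returns False, B raises IndexError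
import Mathlib
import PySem

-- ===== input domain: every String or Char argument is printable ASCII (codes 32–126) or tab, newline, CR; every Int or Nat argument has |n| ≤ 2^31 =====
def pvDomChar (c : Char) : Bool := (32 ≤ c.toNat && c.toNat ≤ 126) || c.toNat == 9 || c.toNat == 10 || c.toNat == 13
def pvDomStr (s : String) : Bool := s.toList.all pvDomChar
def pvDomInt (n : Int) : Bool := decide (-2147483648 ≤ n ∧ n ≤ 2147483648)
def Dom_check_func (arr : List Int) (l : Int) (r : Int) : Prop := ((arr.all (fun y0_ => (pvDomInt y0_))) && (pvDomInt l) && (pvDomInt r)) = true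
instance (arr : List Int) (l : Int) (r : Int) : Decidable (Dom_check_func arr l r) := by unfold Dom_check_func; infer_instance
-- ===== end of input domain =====

-- B replaces A's scan over all index triples by a single pass tracking the two
-- smallest values and the maximum of the window: all triangles are valid iff min1+min2 > max.

-- ===== PORT A =====
def check_func (arr : List Int) (l : Int) (r : Int) : Bool :=
  if r - l < 2 ∨ l = r then true
  else
    !((PySem.List.pyRange l r 1).any (fun x =>
        (PySem.List.pyRange (x+1) r 1).any (fun y =>
          (PySem.List.pyRange (y+1) (r+1) 1).any (fun z =>
            decide (PySem.List.pyGetD arr x 0 + PySem.List.pyGetD arr y 0 ≤ PySem.List.pyGetD arr z 0 ∨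
                    PySem.List.pyGetD arr y 0 + PySem.List.pyGetD arr z 0 ≤ PySem.List.pyGetD arr x 0 ∨
                    PySem.List.pyGetD arr z 0 + PySem.List.pyGetD arr x 0 ≤ PySem.List.pyGetD arr y 0)))))

-- ===== PORT B =====
-- loop body of Source B: update (min1, min2, max) with the value at index i
def altStep (arr : List Int) (s : Int × Int × Int) (i : Int) : Int × Int × Int :=
  ( if PySem.List.pyGetD arr i 0 < s.1 then PySem.List.pyGetD arr i 0 else s.1,
    if PySem.List.pyGetD arr i 0 < s.1 then s.1
    else if PySem.List.pyGetD arr i 0 < s.2.1 then PySem.List.pyGetD arr i 0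
    else s.2.1,
    if s.2.2 < PySem.List.pyGetD arr i 0 then PySem.List.pyGetD arr i 0 else s.2.2 )

-- initial state of Source B's loop, from arr[l] and arr[l+1]
def altInit (arr : List Int) (l : Int) : Int × Int × Int :=
  if PySem.List.pyGetD arr l 0 ≤ PySem.List.pyGetD arr (l+1) 0 then
    (PySem.List.pyGetD arr l 0, PySem.List.pyGetD arr (l+1) 0, PySem.List.pyGetD arr (l+1) 0)
  else
    (PySem.List.pyGetD arr (l+1) 0, PySem.List.pyGetD arr l 0, PySem.List.pyGetD arr l 0)

def check_func_alt (arr : List Int) (l : Int) (r : Int) : Bool :=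
  if r - l < 2 then true
  else
    let st := (PySem.List.pyRange (l+2) (r+1) 1).foldl (altStep arr) (altInit arr l)
    decide (st.2.2 < st.1 + st.2.1)

-- ===== PRECONDITION & SPEC =====
-- Pre_ excludes windows reaching out-of-range indices: there A raises IndexError, or (when an
-- invalid triple appears before the first out-of-range access) returns False by early exit,
-- while B's single pass raises IndexError.
def Pre_check_func (arr : List Int) (l : Int) (r : Int) : Prop :=
  r - l < 2 ∨ (-(arr.length : Int) ≤ l ∧ r < (arr.length : Int))
instance (arr : List Int) (l : Int) (r : Int) : Decidable (Pre_check_func arr l r) := by unfold Pre_check_func; infer_instance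
def pvWitness_check_func : List Int × Int × Int := ([1, 2, 2], 0, 2)
def Spec_check_func (arr : List Int) (l : Int) (r : Int) (out : Bool) : Prop := out = check_func_alt arr l r
instance (arr : List Int) (l : Int) (r : Int) (out : Bool) : Decidable (Spec_check_func arr l r out) := by unfold Spec_check_func; infer_instance

-- ===== CLAIM (what is proved, stated in full; the proofs are below) =====
def Claim_equal_check_func : Prop := ∀ (arr : List Int) (l : Int) (r : Int), Dom_check_func arr l r → Pre_check_func arr l r → Spec_check_func arr l r (check_func arr l r)

-- ===== LEMMAS AND PROOFS =====

-- Loop invariant of B's pass: after consuming indices l..m, the state holds the minimum,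
-- second minimum and maximum of the values at indices l..m (as positions, not values).
def pvInv (arr : List Int) (l m : Int) (s : Int × Int × Int) : Prop :=
  s.1 ≤ s.2.1 ∧
  (∀ i, l ≤ i → i ≤ m → s.1 ≤ PySem.List.pyGetD arr i 0) ∧
  (∀ i, l ≤ i → i ≤ m → PySem.List.pyGetD arr i 0 ≤ s.2.2) ∧
  (∃ t, l ≤ t ∧ t ≤ m ∧ PySem.List.pyGetD arr t 0 = s.2.2) ∧
  (∃ p q, l ≤ p ∧ p ≤ m ∧ l ≤ q ∧ q ≤ m ∧ p ≠ q ∧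
    PySem.List.pyGetD arr p 0 = s.1 ∧ PySem.List.pyGetD arr q 0 = s.2.1 ∧
    ∀ i, l ≤ i → i ≤ m → i ≠ p → s.2.1 ≤ PySem.List.pyGetD arr i 0)

lemma inv_base (arr : List Int) (l : Int) : pvInv arr l (l+1) (altInit arr l) := by
  unfold pvInv altInit
  split_ifs with h <;> dsimp only
  · refine ⟨h, ?_, ?_, ⟨l+1, by omega, by omega, rfl⟩, l, l+1, by omega, by omega, by omega, by omega,
      by omega, rfl, rfl, ?_⟩ <;>
    · intro i hi1 hi2 
      try intro hne
      rcases (by omega : i = l ∨ i = l + 1) with h' | h' <;> subst h' <;> omega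
  · refine ⟨by omega, ?_, ?_, ⟨l, by omega, by omega, rfl⟩, l+1, l, by omega, by omega, by omega, by omega,
      by omega, rfl, rfl, ?_⟩ <;>
    · intro i hi1 hi2
      try intro hne
      rcases (by omega : i = l ∨ i = l + 1) with h' | h' <;> subst h' <;> omega

lemma inv_step (arr : List Int) (l m : Int) (s : Int × Int × Int)
    (h : pvInv arr l m s) : pvInv arr l (m+1) (altStep arr s (m+1)) := by
  obtain ⟨m1, m2, mx⟩ := s
  obtain ⟨h12, hmin, hmax, ⟨t, ht1, ht2, ht3⟩, p, q, hp1, hp2, hq1, hq2, hpq, hgp, hgq, hsec⟩ := h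
  dsimp only at h12 hmin hmax ht3 hgp hgq hsec
  unfold pvInv altStep
  dsimp only
  by_cases hv1 : PySem.List.pyGetD arr (m+1) 0 < m1
  · rw [if_pos hv1, if_pos hv1]
    refine ⟨by omega, ?_, ?_, ?_, m+1, p, by omega, by omega, by omega, by omega, by omega, rfl, hgp, ?_⟩
    · intro i hi1 hi2
      rcases (by omega : i ≤ m ∨ i = m + 1) with h' | h'
      · have := hmin i hi1 h'; omega
      · subst h'; omega
    · intro i hi1 hi2
      split_ifs with hmx
      · rcases (by omega : i ≤ m ∨ i = m + 1) with h' | h'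
        · have := hmax i hi1 h'; omega
        · subst h'; omega
      · rcases (by omega : i ≤ m ∨ i = m + 1) with h' | h'
        · exact hmax i hi1 h'
        · subst h'; omega
    · split_ifs with hmx
      · exact ⟨m+1, by omega, by omega, rfl⟩
      · exact ⟨t, ht1, by omega, ht3⟩
    · intro i hi1 hi2 hne
      rcases (by omega : i ≤ m ∨ i = m + 1) with h' | h'
      · exact hmin i hi1 h'
      · omega
  · rw [if_neg hv1, if_neg hv1]
    by_cases hv2 : PySem.List.pyGetD arr (m+1) 0 < m2
    · rw [if_pos hv2]
      refine ⟨by omega, ?_, ?_, ?_, p, m+1, by omega, by omega, by omega, by omega, by omega, hgp, rfl, ?_⟩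
      · intro i hi1 hi2
        rcases (by omega : i ≤ m ∨ i = m + 1) with h' | h'
        · exact hmin i hi1 h'
        · subst h'; omega
      · intro i hi1 hi2
        split_ifs with hmx
        · rcases (by omega : i ≤ m ∨ i = m + 1) with h' | h'
          · have := hmax i hi1 h'; omega
          · subst h'; omega
        · rcases (by omega : i ≤ m ∨ i = m + 1) with h' | h'
          · exact hmax i hi1 h'
          · subst h'; omega
      · split_ifs with hmx
        · exact ⟨m+1, by omega, by omega, rfl⟩
        · exact ⟨t, ht1, by omega, ht3⟩
      · intro i hi1 hi2 hne
        rcases (by omega : i ≤ m ∨ i = m + 1) with h' | h'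
        · have := hsec i hi1 h' (by omega : i ≠ p); omega
        · subst h'; omega
    · rw [if_neg hv2]
      refine ⟨h12, ?_, ?_, ?_, p, q, by omega, by omega, by omega, by omega, hpq, hgp, hgq, ?_⟩
      · intro i hi1 hi2
        rcases (by omega : i ≤ m ∨ i = m + 1) with h' | h'
        · exact hmin i hi1 h'
        · subst h'; omega
      · intro i hi1 hi2
        split_ifs with hmx
        · rcases (by omega : i ≤ m ∨ i = m + 1) with h' | h'
          · have := hmax i hi1 h'; omega
          · subst h'; omega
        · rcases (by omega : i ≤ m ∨ i = m + 1) with h' | h'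
          · exact hmax i hi1 h'
          · subst h'; omega
      · split_ifs with hmx
        · exact ⟨m+1, by omega, by omega, rfl⟩
        · exact ⟨t, ht1, by omega, ht3⟩
      · intro i hi1 hi2 hne
        rcases (by omega : i ≤ m ∨ i = m + 1) with h' | h'
        · exact hsec i hi1 h' hne
        · subst h'; omega

lemma inv_fold (arr : List Int) (l : Int) :
    ∀ k : Nat, pvInv arr l (l + 1 + (k : Int))
      ((PySem.List.pyRange (l+2) (l + 2 + (k : Int)) 1).foldl (altStep arr) (altInit arr l)) := by
  intro k
  induction k with
  | zero =>
      simp only [Nat.cast_zero, add_zero]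
      rw [PySem.List.pyRange_one_eq_nil (by omega)]
      exact inv_base arr l
  | succ n ih =>
      have e1 : l + 2 + ((n+1 : Nat) : Int) = (l + 2 + (n : Int)) + 1 := by push_cast; ring
      rw [e1, PySem.List.pyRange_one_succ_right (by omega), List.foldl_append]
      have e2 : l + 1 + ((n+1 : Nat) : Int) = (l + 1 + (n : Int)) + 1 := by push_cast; ring
      rw [e2]
      have h := inv_step arr l (l + 1 + (n : Int)) _ ih
      have e3 : l + 1 + (n : Int) + 1 = l + 2 + (n : Int) := by ring
      rw [e3] at h
      rw [show (l + 1 + (n : Int)) + 1 = l + 2 + (n : Int) from by ring]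
      simp only [List.foldl]
      exact h

-- pair sums are bounded below by min1 + min2
lemma pair_bound (arr : List Int) (l r : Int) (s : Int × Int × Int) (h : pvInv arr l r s)
    (u v : Int) (hu1 : l ≤ u) (hu2 : u ≤ r) (hv1 : l ≤ v) (hv2 : v ≤ r) (huv : u ≠ v) :
    s.1 + s.2.1 ≤ PySem.List.pyGetD arr u 0 + PySem.List.pyGetD arr v 0 := by
  obtain ⟨h12, hmin, hmax, -, p, q, hp1, hp2, hq1, hq2, hpq, hgp, hgq, hsec⟩ := h
  by_cases hup : u = p
  · have := hsec v hv1 hv2 (by omega : v ≠ p)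
    have := hmin u hu1 hu2
    omega
  · have := hsec u hu1 hu2 hup
    have := hmin v hv1 hv2
    omega

lemma no_bad_of_lt (arr : List Int) (l r : Int) (s : Int × Int × Int) (h : pvInv arr l r s)
    (hlt : s.2.2 < s.1 + s.2.1) (x y z : Int)
    (hx : l ≤ x) (hxy : x < y) (hyz : y < z) (hz : z ≤ r) :
    ¬ (PySem.List.pyGetD arr x 0 + PySem.List.pyGetD arr y 0 ≤ PySem.List.pyGetD arr z 0 ∨
       PySem.List.pyGetD arr y 0 + PySem.List.pyGetD arr z 0 ≤ PySem.List.pyGetD arr x 0 ∨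
       PySem.List.pyGetD arr z 0 + PySem.List.pyGetD arr x 0 ≤ PySem.List.pyGetD arr y 0) := by
  have hxy' := pair_bound arr l r s h x y hx (by omega) (by omega) (by omega) (by omega)
  have hyz' := pair_bound arr l r s h y z (by omega) (by omega) (by omega) hz (by omega)
  have hxz' := pair_bound arr l r s h x z hx (by omega) (by omega) hz (by omega)
  have hmx := h.2.2.1
  have h1 := hmx x hx (by omega)
  have h2 := hmx y (by omega) (by omega)
  have h3 := hmx z (by omega) hz
  omega

lemma bad_of_le (arr : List Int) (l r : Int) (s : Int × Int × Int) (h : pvInv arr l r s)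
    (hlr : l + 2 ≤ r) (hle : s.1 + s.2.1 ≤ s.2.2) :
    ∃ x y z, l ≤ x ∧ x < y ∧ y < z ∧ z ≤ r ∧
      (PySem.List.pyGetD arr x 0 + PySem.List.pyGetD arr y 0 ≤ PySem.List.pyGetD arr z 0 ∨
       PySem.List.pyGetD arr y 0 + PySem.List.pyGetD arr z 0 ≤ PySem.List.pyGetD arr x 0 ∨
       PySem.List.pyGetD arr z 0 + PySem.List.pyGetD arr x 0 ≤ PySem.List.pyGetD arr y 0) := by
  obtain ⟨h12, hmin, hmax, ⟨t, ht1, ht2, ht3⟩, p, q, hp1, hp2, hq1, hq2, hpq, hgp, hgq, hsec⟩ := h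
  -- find a third index w ∉ {p,q} with g p + g q ≤ g w
  have hthird : ∃ w, l ≤ w ∧ w ≤ r ∧ w ≠ p ∧ w ≠ q ∧
      PySem.List.pyGetD arr p 0 + PySem.List.pyGetD arr q 0 ≤ PySem.List.pyGetD arr w 0 := by
    by_cases hc : t ≠ p ∧ t ≠ q
    · exact ⟨t, ht1, ht2, hc.1, hc.2, by omega⟩
    · -- the max sits on p or q, hence mx = m2 and m1 ≤ 0; any third index works
      have hmx2 : s.2.2 ≤ s.2.1 ∨ True := Or.inr trivial
      have htpq : t = p ∨ t = q := by tauto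
      have hmxle : PySem.List.pyGetD arr t 0 ≤ s.2.1 := by
        rcases htpq with h' | h' <;> subst h' <;> omega
      have hw : ∃ w, l ≤ w ∧ w ≤ l + 2 ∧ w ≠ p ∧ w ≠ q := by
        by_cases h1 : p ≠ l ∧ q ≠ l
        · exact ⟨l, by omega, by omega, h1.1.symm, h1.2.symm⟩
        · by_cases h2 : p ≠ l + 1 ∧ q ≠ l + 1
          · exact ⟨l + 1, by omega, by omega, h2.1.symm, h2.2.symm⟩
          · simp only [not_and_or, not_not] at h1 h2
            refine ⟨l + 2, by omega, by omega, ?_, ?_⟩ <;> omega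
      obtain ⟨w, hw1, hw2, hwp, hwq⟩ := hw
      have := hsec w hw1 (by omega) hwp
      exact ⟨w, hw1, by omega, hwp, hwq, by omega⟩
  obtain ⟨w, hw1, hw2, hwp, hwq, hwsum⟩ := hthird
  rcases (by omega : (p < q ∧ q < w) ∨ (p < w ∧ w < q) ∨ (q < p ∧ p < w) ∨
      (q < w ∧ w < p) ∨ (w < p ∧ p < q) ∨ (w < q ∧ q < p)) with
    ⟨ha, hb⟩ | ⟨ha, hb⟩ | ⟨ha, hb⟩ | ⟨ha, hb⟩ | ⟨ha, hb⟩ | ⟨ha, hb⟩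
  · exact ⟨p, q, w, by omega, ha, hb, by omega, by omega⟩
  · exact ⟨p, w, q, by omega, ha, hb, by omega, by omega⟩
  · exact ⟨q, p, w, by omega, ha, hb, by omega, by omega⟩
  · exact ⟨q, w, p, by omega, ha, hb, by omega, by omega⟩
  · exact ⟨w, p, q, by omega, ha, hb, by omega, by omega⟩
  · exact ⟨w, q, p, by omega, ha, hb, by omega, by omega⟩

-- A's nested any-loops say exactly: some index triple violates the triangle inequality
lemma anyA_iff (arr : List Int) (l r : Int) :
    ((PySem.List.pyRange l r 1).any (fun x =>
        (PySem.List.pyRange (x+1) r 1).any (fun y =>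
          (PySem.List.pyRange (y+1) (r+1) 1).any (fun z =>
            decide (PySem.List.pyGetD arr x 0 + PySem.List.pyGetD arr y 0 ≤ PySem.List.pyGetD arr z 0 ∨
                    PySem.List.pyGetD arr y 0 + PySem.List.pyGetD arr z 0 ≤ PySem.List.pyGetD arr x 0 ∨
                    PySem.List.pyGetD arr z 0 + PySem.List.pyGetD arr x 0 ≤ PySem.List.pyGetD arr y 0)))) = true)
    ↔ (∃ x y z, l ≤ x ∧ x < y ∧ y < z ∧ z ≤ r ∧
      (PySem.List.pyGetD arr x 0 + PySem.List.pyGetD arr y 0 ≤ PySem.List.pyGetD arr z 0 ∨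
       PySem.List.pyGetD arr y 0 + PySem.List.pyGetD arr z 0 ≤ PySem.List.pyGetD arr x 0 ∨
       PySem.List.pyGetD arr z 0 + PySem.List.pyGetD arr x 0 ≤ PySem.List.pyGetD arr y 0)) := by
  simp only [List.any_eq_true, PySem.List.mem_pyRange_one, decide_eq_true_eq]
  constructor
  · rintro ⟨x, ⟨hx1, hx2⟩, y, ⟨hy1, hy2⟩, z, ⟨hz1, hz2⟩, hb⟩
    exact ⟨x, y, z, by omega, by omega, by omega, by omega, hb⟩
  · rintro ⟨x, y, z, hx, hxy, hyz, hz, hb⟩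
    exact ⟨x, ⟨by omega, by omega⟩, y, ⟨by omega, by omega⟩, z, ⟨by omega, by omega⟩, hb⟩

lemma inv_at_r (arr : List Int) (l r : Int) (hlr : l + 2 ≤ r) :
    pvInv arr l r ((PySem.List.pyRange (l+2) (r+1) 1).foldl (altStep arr) (altInit arr l)) := by
  have h := inv_fold arr l (r - l - 1).toNat
  have e1 : l + 1 + (((r - l - 1).toNat : Nat) : Int) = r := by omega
  have e2 : l + 2 + (((r - l - 1).toNat : Nat) : Int) = r + 1 := by omega
  rw [e1, e2] at h
  exact h

-- ===== VERDICT (by name: the statement is the Claim_ definition above) =====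
theorem check_func_spec : Claim_equal_check_func := by
  intro arr l r _ hpre
  unfold Spec_check_func check_func check_func_alt
  by_cases hlr : r - l < 2
  · rw [if_pos (Or.inl hlr), if_pos hlr]
  · have hlr2 : l + 2 ≤ r := by omega
    rw [if_neg (by omega : ¬ (r - l < 2 ∨ l = r)), if_neg hlr]
    have hinv := inv_at_r arr l r hlr2
    set st := (PySem.List.pyRange (l+2) (r+1) 1).foldl (altStep arr) (altInit arr l) with hst
    by_cases hbad : ∃ x y z, l ≤ x ∧ x < y ∧ y < z ∧ z ≤ r ∧
      (PySem.List.pyGetD arr x 0 + PySem.List.pyGetD arr y 0 ≤ PySem.List.pyGetD arr z 0 ∨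
       PySem.List.pyGetD arr y 0 + PySem.List.pyGetD arr z 0 ≤ PySem.List.pyGetD arr x 0 ∨
       PySem.List.pyGetD arr z 0 + PySem.List.pyGetD arr x 0 ≤ PySem.List.pyGetD arr y 0)
    · rw [(anyA_iff arr l r).mpr hbad]
      obtain ⟨x, y, z, hx, hxy, hyz, hz, hb⟩ := hbad
      have hnlt : ¬ st.2.2 < st.1 + st.2.1 := fun hlt =>
        no_bad_of_lt arr l r st hinv hlt x y z hx hxy hyz hz hb
      simp [hnlt]
    · have hlt : st.2.2 < st.1 + st.2.1 := by
        by_contra hge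
        exact hbad (bad_of_le arr l r st hinv hlr2 (by omega))
      rw [(fun h => by simpa using (not_iff_not.mpr (anyA_iff arr l r)).mpr h : 
        ¬ (∃ x y z, l ≤ x ∧ x < y ∧ y < z ∧ z ≤ r ∧
      (PySem.List.pyGetD arr x 0 + PySem.List.pyGetD arr y 0 ≤ PySem.List.pyGetD arr z 0 ∨
       PySem.List.pyGetD arr y 0 + PySem.List.pyGetD arr z 0 ≤ PySem.List.pyGetD arr x 0 ∨
       PySem.List.pyGetD arr z 0 + PySem.List.pyGetD arr x 0 ≤ PySem.List.pyGetD arr y 0)) →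
        ((PySem.List.pyRange l r 1).any _ = false)) hbad]
      simp [hlt]
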